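-- pv_equiv track=rewrite | github.com/walterleonardo/python_useful_scripts | replaceStringaa*bv2.py | replace_double_letters
-- ===== SOURCE A (Python) =====
-- def replace_double_letters(string):
--     alphabet = 'abcdefghijklmnopqrstuvwxyz'
--     new_string = ""
--
--     i = 0
--     while i < len(string):
--         if i+1 < len(string) and string[i] == string[i+1]:
--             index = alphabet.index(string[i])
--             new_string += alphabet[index+1]
--             i += 2
--         else:
--             new_string += string[i]
--             i += 1
--
--     return new_string
-- ===== SOURCE B (Python) =====
-- def replace_double_letters(string):
--     alphabet = 'abcdefghijklmnopqrstuvwxyz'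
--     out = []
--     pending = None
--     for c in string:
--         if pending is None:
--             pending = c
--         elif pending == c:
--             out.append(alphabet[alphabet.index(pending) + 1])
--             pending = None
--         else:
--             out.append(pending)
--             pending = c
--     if pending is not None:
--         out.append(pending)
--     return ''.join(out)
-- ===== Notes on version B (the rewrite author's own statement) =====
-- stated objective: faster
-- what changed: Replaces the index-based while loop with variable 1-or-2 step, lookahead and quadratic string += by a single for-each pass maintaining one pending character of state, appending to a list and joining once at the end.
import Mathlib
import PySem

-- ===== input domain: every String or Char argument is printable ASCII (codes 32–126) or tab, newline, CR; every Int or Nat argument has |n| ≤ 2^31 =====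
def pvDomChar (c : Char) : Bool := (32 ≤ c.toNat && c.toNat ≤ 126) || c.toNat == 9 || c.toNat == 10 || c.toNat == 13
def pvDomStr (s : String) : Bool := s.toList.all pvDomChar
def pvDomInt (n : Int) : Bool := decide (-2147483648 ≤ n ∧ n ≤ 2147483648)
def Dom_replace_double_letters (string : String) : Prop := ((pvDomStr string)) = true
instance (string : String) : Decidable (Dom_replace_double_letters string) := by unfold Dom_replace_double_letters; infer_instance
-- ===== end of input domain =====

-- B rewrites A's index-with-lookahead while loop as a single for-each pass over the
-- characters carrying one pending character of state (objective: alternative).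

-- ===== PORT A =====
-- alphabet.index(c) then alphabet[index+1]; under Pre_ both lookups succeed — the ' '
-- defaults stand for the ValueError/IndexError branches Pre_ excludes.
def pvNextA (c : Char) : Char :=
  let alphabet := "abcdefghijklmnopqrstuvwxyz".toList
  match alphabet.idxOf? c with
  | some i => alphabet.getD (i + 1) ' '
  | none => ' '

-- the while loop over index i, advancing by 2 on a matched pair and by 1 otherwise,
-- as structural recursion on the characters not yet consumed
def pvGoA : List Char → List Char
  | [] => []
  | [c] => [c]
  | c :: d :: rest => if c = d then pvNextA c :: pvGoA rest else c :: pvGoA (d :: rest)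

def replace_double_letters (string : String) : String :=
  String.mk (pvGoA string.toList)

-- ===== PORT B =====
def pvNextB (c : Char) : Char :=
  let alphabet := "abcdefghijklmnopqrstuvwxyz".toList
  match alphabet.idxOf? c with
  | some i => alphabet.getD (i + 1) ' '
  | none => ' '

-- one for-loop step: state = (output so far, pending character)
def pvStepB (st : List Char × Option Char) (c : Char) : List Char × Option Char :=
  match st.2 with
  | none => (st.1, some c)
  | some p => if p = c then (st.1 ++ [pvNextB p], none) else (st.1 ++ [p], some c)

def replace_double_letters_alt (string : String) : String :=
  let st := string.toList.foldl pvStepB ([], none)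
  String.mk (st.1 ++ st.2.toList)

-- ===== PRECONDITION & SPEC =====
-- Pre_ excludes exactly the strings containing an adjacent doubled character that is not one
-- of the first 25 lowercase letters: there the Python A raises (IndexError on a doubled final
-- letter, ValueError otherwise) and the Python B raises the same exception.
def Pre_replace_double_letters (string : String) : Prop :=
  ∀ p ∈ string.toList.zip string.toList.tail, p.1 = p.2 → 'a' ≤ p.1 ∧ p.1 ≤ 'y'
instance (string : String) : Decidable (Pre_replace_double_letters string) := by
  unfold Pre_replace_double_letters; infer_instance
def pvWitness_replace_double_letters : String := "hheelllo"

def Spec_replace_double_letters (string : String) (out : String) : Prop := out = replace_double_letters_alt string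
instance (string : String) (out : String) : Decidable (Spec_replace_double_letters string out) := by unfold Spec_replace_double_letters; infer_instance

-- ===== CLAIM (what is proved, stated in full; the proofs are below) =====
def Claim_equal_replace_double_letters : Prop := ∀ (string : String), Dom_replace_double_letters string → Pre_replace_double_letters string → Spec_replace_double_letters string (replace_double_letters string)

-- ===== LEMMAS AND PROOFS =====

theorem pvFold_eq_goA : ∀ (l acc : List Char),
    (let st := l.foldl pvStepB (acc, none); st.1 ++ st.2.toList) = acc ++ pvGoA l := by
  intro l
  induction l using pvGoA.induct with
  | case1 => intro acc; simp [pvGoA]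
  | case2 c => intro acc; simp [pvGoA, pvStepB]
  | case3 d rest ih =>
      intro acc
      have e1 : List.foldl pvStepB (acc, none) (d :: d :: rest)
          = List.foldl pvStepB (acc ++ [pvNextB d], none) rest := by
        show List.foldl pvStepB (pvStepB (pvStepB (acc, none) d) d) rest = _
        rw [show pvStepB (pvStepB (acc, none) d) d = (acc ++ [pvNextB d], none) from by
          simp [pvStepB]]
      have hg : pvGoA (d :: d :: rest) = pvNextA d :: pvGoA rest := by
        rw [pvGoA]; simp
      show (List.foldl pvStepB (acc, none) (d :: d :: rest)).1
          ++ (List.foldl pvStepB (acc, none) (d :: d :: rest)).2.toList = acc ++ pvGoA (d :: d :: rest)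
      rw [e1, hg]
      have := ih (acc ++ [pvNextB d])
      simpa [pvNextB, pvNextA] using this
  | case4 c d rest h ih =>
      intro acc
      have e1 : List.foldl pvStepB (acc, none) (c :: d :: rest)
          = List.foldl pvStepB (acc ++ [c], none) (d :: rest) := by
        show List.foldl pvStepB (pvStepB (pvStepB (acc, none) c) d) rest = _
        rw [show pvStepB (pvStepB (acc, none) c) d = (acc ++ [c], some d) from by
          simp [pvStepB, h]]
        rfl
      have hg : pvGoA (c :: d :: rest) = c :: pvGoA (d :: rest) := by
        rw [pvGoA]; simp [h]
      show (List.foldl pvStepB (acc, none) (c :: d :: rest)).1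
          ++ (List.foldl pvStepB (acc, none) (c :: d :: rest)).2.toList = acc ++ pvGoA (c :: d :: rest)
      rw [e1, hg]
      have := ih (acc ++ [c])
      simpa using this

-- ===== VERDICT (by name: the statement is the Claim_ definition above) =====
theorem replace_double_letters_spec : Claim_equal_replace_double_letters := by
  intro s _ _
  unfold Spec_replace_double_letters replace_double_letters replace_double_letters_alt
  have h := pvFold_eq_goA s.toList []
  simp only [List.nil_append] at h
  simp only [← h]
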